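-- pv_equiv track=rewrite | github.com/PrakNew/Competitive-Programming | next&previous_permutation.py | previous
-- ===== SOURCE A (Python) =====
-- def previous(s):
--     i=len(s)-1
--     s=list(s)
--     while i>0 and s[i]>=s[i-1]:
--         i-=1
--     if i<=0:
--         return "NO"
--     j=i-1
--     while j<len(s)-1 and s[j+1]<s[i-1]:
--         j+=1
--     s[j],s[i-1]=s[i-1],s[j]
--     s=s[:i]+s[i:][::-1]
--     k="".join(s)
--     return k
-- ===== SOURCE B (Python) =====
-- def previous(s):
--     # Walk the string right to left.  rev holds the chars already seen, in
--     # reverse order; as long as no pivot was found that suffix of s is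
--     # non-decreasing, i.e. rev is non-increasing and rev[-1] is its minimum.
--     rev = []
--     for i in range(len(s) - 1, -1, -1):
--         c = s[i]
--         if rev and rev[-1] < c:
--             # suffix s[i+1:] is the smallest arrangement of itself and holds
--             # a char below c: the previous permutation changes position i.
--             m = max(d for d in rev if d < c)
--             rev.remove(m)
--             return s[:i] + m + "".join(sorted(rev + [c], reverse=True))
--         rev.append(c)
--     return "NO"
-- ===== Notes on version B (the rewrite author's own statement) =====
-- stated objective: alternative
-- what changed: B replaces A's three-phase index manipulation (pivot scan over list(s), inner scan for the swap partner, swap and slice-reverse of the whole tail) by a single right-to-left traversal with an explicit accumulator holding the reversed suffix, rebuilding the changed tail with max-of-smaller, remove and a descending sort.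
import Mathlib
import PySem

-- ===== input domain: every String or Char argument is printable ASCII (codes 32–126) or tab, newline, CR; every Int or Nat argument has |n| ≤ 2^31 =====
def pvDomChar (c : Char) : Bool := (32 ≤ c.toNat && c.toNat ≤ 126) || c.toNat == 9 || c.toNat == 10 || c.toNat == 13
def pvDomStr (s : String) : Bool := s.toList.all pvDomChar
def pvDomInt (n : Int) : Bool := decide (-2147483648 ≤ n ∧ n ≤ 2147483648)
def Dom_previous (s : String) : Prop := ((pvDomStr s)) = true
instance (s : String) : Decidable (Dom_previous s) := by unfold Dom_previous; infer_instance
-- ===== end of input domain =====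

-- B replaces A's index-based pivot scan / swap / slice-reverse by a right-to-left scan with an
-- explicit accumulator that rebuilds the tail via max-of-smaller / remove / descending sort
-- (objective: alternative decomposition; a timing run measured it faster by a constant factor).

-- ===== PORT A =====
-- s[i] for an index that is always in range at every call site (the loop guards ensure it)
def pvGet (l : List Char) (i : Int) : Char := PySem.List.pyGetD l i ' '

-- while i>0 and s[i]>=s[i-1]: i-=1
def previousLoopI (l : List Char) (i : Int) : Int :=
  if h : 0 < i ∧ pvGet l (i - 1) ≤ pvGet l i then previousLoopI l (i - 1) else i
termination_by i.toNat
decreasing_by omega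

-- while j<len(s)-1 and s[j+1]<s[i-1]: j+=1
def previousLoopJ (l : List Char) (i : Int) (j : Int) : Int :=
  if h : j < PySem.List.len l - 1 ∧ pvGet l (j + 1) < pvGet l (i - 1) then
    previousLoopJ l i (j + 1)
  else j
termination_by (PySem.List.len l - 1 - j).toNat
decreasing_by simp only [PySem.List.len_eq] at h ⊢; omega

def previous (s : String) : String :=
  let l := s.toList                                   -- s=list(s)
  let i := previousLoopI l (PySem.Str.len s - 1)      -- i=len(s)-1; while …
  if i ≤ 0 then "NO"
  else
    let j := previousLoopJ l i (i - 1)                -- j=i-1; while …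
    let l1 := PySem.List.pySetD l j (pvGet l (i - 1)) -- s[j],s[i-1]=s[i-1],s[j]
    let l2 := PySem.List.pySetD l1 (i - 1) (pvGet l j)
    -- s=s[:i]+s[i:][::-1]  ([::-1] is reverse: PySem.List.slice?_none_none_neg_one)
    let l3 := PySem.List.slice l2 none (some i) ++ (PySem.List.slice l2 (some i) none).reverse
    String.ofList l3                                      -- k="".join(s)

-- ===== PORT B =====
-- the body of B's for-loop over i = len(s)-1 … 0: rs is s[:i+1] reversed (so its head is s[i]),
-- rev is B's accumulator; some = early return value (char list), none = loop fell through
def previousAltLoop (rs rev : List Char) : Option (List Char) :=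
  match rs with
  | [] => none
  | c :: rs' =>
    if rev ≠ [] ∧ PySem.List.pyGetD rev (-1) ' ' < c then       -- if rev and rev[-1] < c
      let m := (PySem.List.max? (rev.filter (fun d => d < c)) (fun d => d)).getD ' '  -- max(d for d in rev if d < c); nonempty here
      let rev' := (PySem.List.remove? rev m).getD rev           -- rev.remove(m); m present here
      some (rs'.reverse ++ m :: PySem.List.sorted (rev' ++ [c]) (fun d => d) true)
        -- s[:i] + m + "".join(sorted(rev + [c], reverse=True))
    else previousAltLoop rs' (rev ++ [c])                       -- rev.append(c)

def previous_alt (s : String) : String :=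
  match previousAltLoop s.toList.reverse [] with
  | some l => String.ofList l
  | none => "NO"

-- ===== PRECONDITION & SPEC =====
def Spec_previous (s : String) (out : String) : Prop := out = previous_alt s
instance (s : String) (out : String) : Decidable (Spec_previous s out) := by unfold Spec_previous; infer_instance

-- ===== CLAIM (what is proved, stated in full; the proofs are below) =====
def Claim_equal_previous : Prop := ∀ (s : String), Dom_previous s → Spec_previous s (previous s)

-- ===== LEMMAS AND PROOFS =====

-- A's body re-stated over the character list (proof-side convenience only)
def Abody (cs : List Char) : String :=
  let i := previousLoopI cs ((cs.length : Int) - 1)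
  if i ≤ 0 then "NO"
  else
    let j := previousLoopJ cs i (i - 1)
    let l1 := PySem.List.pySetD cs j (pvGet cs (i - 1))
    let l2 := PySem.List.pySetD l1 (i - 1) (pvGet cs j)
    String.ofList (PySem.List.slice l2 none (some i) ++ (PySem.List.slice l2 (some i) none).reverse)

theorem previous_eq_Abody (s : String) : previous s = Abody s.toList := by
  simp [previous, Abody, PySem.Str.len_eq]

theorem pvGet_eq_getElem (l : List Char) (i : Int) (h0 : 0 ≤ i) (h1 : i < (l.length : Int)) :
    pvGet l i = l[i.toNat]'(by omega) := by
  unfold pvGet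
  exact PySem.List.pyGetD_eq_getElem l ' ' h0 h1

-- reading s[pre.length + u] in pre ++ rest lands in rest
theorem pvGet_add (pre rest : List Char) (u : Nat) :
    pvGet (pre ++ rest) (((pre.length + u : Nat) : Int)) = (rest[u]?).getD ' ' := by
  unfold pvGet
  rw [PySem.List.pyGetD_of_nonneg _ _ (by positivity)]
  have e : ((pre.length + u : Nat) : Int).toNat = pre.length + u := by omega
  rw [e, List.getD_eq_getElem?_getD, List.getElem?_append_right (by omega)]
  have e2 : pre.length + u - pre.length = u := by omega
  rw [e2]

theorem loopI_zero (cs : List Char) : previousLoopI cs 0 = 0 := by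
  rw [previousLoopI]; simp

theorem loopI_skip (cs : List Char) (m : Nat) (hs : (cs.drop m).Pairwise (· ≤ ·)) :
    ∀ (i : Int), (m : Int) ≤ i → i < (cs.length : Int) → previousLoopI cs i = previousLoopI cs m := by
  intro i h1 h2
  induction hf : (i - (m : Int)).toNat generalizing i with
  | zero =>
    have : i = (m : Int) := by omega
    rw [this]
  | succ f ih =>
    have h3 : (m : Int) < i := by omega
    have hle : pvGet cs (i - 1) ≤ pvGet cs i := by
      rw [pvGet_eq_getElem cs (i - 1) (by omega) (by omega), pvGet_eq_getElem cs i (by omega) h2]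
      have hp := List.pairwise_iff_getElem.mp hs (i.toNat - 1 - m) (i.toNat - m)
        (by simp; omega) (by simp; omega) (by omega)
      simp only [List.getElem_drop] at hp
      convert hp using 2 <;> omega
    rw [previousLoopI, dif_pos ⟨by omega, hle⟩]
    exact ih (i - 1) (by omega) (by omega) (by omega)

theorem loopI_pivot (pre S : List Char) (c : Char) (hne : S ≠ []) (hlt : S.head hne < c)
    (hs : S.Pairwise (· ≤ ·)) :
    previousLoopI (pre ++ c :: S) (((pre ++ c :: S).length : Int) - 1) = (pre.length : Int) + 1 := by
  have hS : 0 < S.length := List.length_pos_iff.mpr hne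
  have hd : ((pre ++ c :: S).drop (pre.length + 1)) = S := by
    rw [show pre ++ c :: S = (pre ++ [c]) ++ S by simp]
    exact List.drop_left' (by simp)
  have hlen : (pre ++ c :: S).length = pre.length + 1 + S.length := by simp; omega
  rw [loopI_skip (pre ++ c :: S) (pre.length + 1) (by rw [hd]; exact hs)
      (((pre ++ c :: S).length : Int) - 1) (by omega) (by omega)]
  rw [previousLoopI, dif_neg]
  · push_cast; ring
  · rintro ⟨-, hc⟩
    rw [show ((pre.length + 1 : Nat) : Int) - 1 = ((pre.length + 0 : Nat) : Int) by push_cast; ring,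
        show ((pre.length + 1 : Nat) : Int) = ((pre.length + 1 : Nat) : Int) from rfl] at hc
    rw [pvGet_add, show ((pre.length + 1 : Nat) : Int) = (((pre.length : Nat) + 1 : Nat) : Int) by push_cast; ring,
        pvGet_add] at hc
    simp only [List.getElem?_cons_zero, List.getElem?_cons_succ, Option.getD_some] at hc
    rw [List.getElem?_eq_getElem (by omega), Option.getD_some, List.getElem_zero] at hc
    exact absurd hc (not_le.mpr hlt)

-- elements of the takeWhile prefix satisfy S[u] < c; the first element after it does not
theorem takeWhile_lt (S : List Char) (c : Char) :
    ∀ u : Nat, u < (S.takeWhile (fun d => decide (d < c))).length →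
      (S[u]?).getD ' ' < c := by
  induction S with
  | nil => intro u hu; simp at hu
  | cons a S' ih =>
    intro u hu
    rw [List.takeWhile_cons] at hu
    by_cases ha : a < c
    · rw [decide_eq_true ha] at hu
      simp only [if_true, List.length_cons] at hu
      cases u with
      | zero => simpa using ha
      | succ v =>
        rw [List.getElem?_cons_succ]
        exact ih v (by omega)
    · rw [decide_eq_false ha] at hu
      simp at hu

theorem takeWhile_stop (S : List Char) (c : Char)
    (ht : (S.takeWhile (fun d => decide (d < c))).length < S.length) :
    ¬ ((S[(S.takeWhile (fun d => decide (d < c))).length]?).getD ' ' < c) := by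
  induction S with
  | nil => simp at ht
  | cons a S' ih =>
    rw [List.takeWhile_cons] at ht ⊢
    by_cases ha : a < c
    · rw [decide_eq_true ha] at ht ⊢
      simp only [if_true, List.length_cons] at ht ⊢
      rw [List.getElem?_cons_succ]
      exact ih (by omega)
    · rw [decide_eq_false ha] at ht ⊢
      simpa using ha

-- getElem versions, for in-range indices
theorem takeWhile_getElem_lt (S : List Char) (c : Char) (u : Nat)
    (hu : u < (S.takeWhile (fun d => decide (d < c))).length) (h : u < S.length) :
    S[u] < c := by
  have h1 := takeWhile_lt S c u hu
  rwa [List.getElem?_eq_getElem h, Option.getD_some] at h1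

theorem takeWhile_stop_not_lt (S : List Char) (c : Char)
    (ht : (S.takeWhile (fun d => decide (d < c))).length < S.length) :
    ¬ (S[(S.takeWhile (fun d => decide (d < c))).length]'ht < c) := by
  have h1 := takeWhile_stop S c ht
  rwa [List.getElem?_eq_getElem ht, Option.getD_some] at h1

theorem loopJ_run (pre S : List Char) (c : Char) (hs : S.Pairwise (· ≤ ·)) :
    ∀ u : Nat, u ≤ (S.takeWhile (fun d => decide (d < c))).length →
      previousLoopJ (pre ++ c :: S) ((pre.length : Int) + 1) ((pre.length : Int) + (u : Int)) =
        (pre.length : Int) + ((S.takeWhile (fun d => decide (d < c))).length : Int) := by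
  have htle : (S.takeWhile (fun d => decide (d < c))).length ≤ S.length :=
    (List.takeWhile_prefix _).length_le
  have hlen : (pre ++ c :: S).length = pre.length + 1 + S.length := by simp; omega
  have hgetc : pvGet (pre ++ c :: S) ((pre.length : Int) + 1 - 1) = c := by
    rw [show (pre.length : Int) + 1 - 1 = ((pre.length + 0 : Nat) : Int) by push_cast; ring,
        pvGet_add]
    simp
  suffices H : ∀ f u, u ≤ (S.takeWhile (fun d => decide (d < c))).length →
      (S.takeWhile (fun d => decide (d < c))).length - u = f →
      previousLoopJ (pre ++ c :: S) ((pre.length : Int) + 1) ((pre.length : Int) + (u : Int)) =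
        (pre.length : Int) + ((S.takeWhile (fun d => decide (d < c))).length : Int) by
    intro u hu; exact H _ u hu rfl
  intro f
  induction f with
  | zero =>
    intro u hu hf
    have hut : u = (S.takeWhile (fun d => decide (d < c))).length := by omega
    subst hut
    rw [previousLoopJ, dif_neg]
    rintro ⟨hj1, hj2⟩
    simp only [PySem.List.len_eq, hlen] at hj1
    have hult : (S.takeWhile (fun d => decide (d < c))).length < S.length := by
      push_cast at hj1; omega
    rw [hgetc, show (pre.length : Int) + (((S.takeWhile (fun d => decide (d < c))).length : Nat) : Int) + 1 =
        ((pre.length + ((S.takeWhile (fun d => decide (d < c))).length + 1) : Nat) : Int)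
      by push_cast; ring, pvGet_add] at hj2
    rw [List.getElem?_cons_succ] at hj2
    exact takeWhile_stop S c hult hj2
  | succ f ih =>
    intro u hu hf
    have hut : u < (S.takeWhile (fun d => decide (d < c))).length := by omega
    rw [previousLoopJ, dif_pos]
    · rw [show (pre.length : Int) + (u : Int) + 1 = (pre.length : Int) + ((u + 1 : Nat) : Int)
        by push_cast; ring]
      exact ih (u + 1) (by omega) (by omega)
    · constructor
      · simp only [PySem.List.len_eq, hlen]; push_cast; omega
      · rw [hgetc, show (pre.length : Int) + (u : Int) + 1 = ((pre.length + (u + 1) : Nat) : Int)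
          by push_cast; ring, pvGet_add]
        rw [List.getElem?_cons_succ]
        exact takeWhile_lt S c u hut

-- the head of a non-decreasing list is its minimum
theorem head_min_of_pairwise_le (l : List Char) (hs : l.Pairwise (· ≤ ·)) (hne : l ≠ []) :
    ∀ a ∈ l, l.head hne ≤ a := by
  cases l with
  | nil => exact absurd rfl hne
  | cons x tl =>
    intro a ha
    simp only [List.head_cons]
    rcases List.mem_cons.mp ha with h1 | h1
    · exact le_of_eq h1.symm
    · exact List.rel_of_pairwise_cons hs h1

-- the minimum of a non-increasing list is its last element
theorem last_min_of_pairwise_ge (rev : List Char) (h : rev.Pairwise (fun a b => b ≤ a))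
    (hne : rev ≠ []) : ∀ a ∈ rev, rev.getLast hne ≤ a := by
  intro a ha
  rw [List.getLast_eq_head_reverse]
  exact head_min_of_pairwise_le rev.reverse (List.pairwise_reverse.mpr h) (by simpa using hne)
    a (by simpa using ha)

-- on a non-decreasing list, a downward-closed filter is a prefix
theorem sorted_filter_eq_takeWhile (S : List Char) (c : Char) (hs : S.Pairwise (· ≤ ·)) :
    S.filter (fun d => decide (d < c)) = S.takeWhile (fun d => decide (d < c)) := by
  induction S with
  | nil => rfl
  | cons a S' ih =>
    rcases List.pairwise_cons.mp hs with ⟨hrel, htail⟩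
    by_cases hac : a < c
    · simp [List.filter_cons, List.takeWhile_cons, hac, ih htail]
    · simp only [List.filter_cons, List.takeWhile_cons]
      rw [decide_eq_false hac]
      simp only [Bool.false_eq_true, if_false, cond_false]
      rw [List.filter_eq_nil_iff.mpr]
      intro x hx
      simp only [decide_eq_true_eq]
      exact fun hxc => hac (lt_of_le_of_lt (hrel x hx) hxc)

-- B's max-of-smaller equals S[t-1] on the sorted suffix S = rev.reverse
theorem max_smaller_eq (S : List Char) (c : Char) (hs : S.Pairwise (· ≤ ·))
    (ht : 0 < (S.takeWhile (fun d => decide (d < c))).length) :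
    (PySem.List.max? (S.reverse.filter (fun d => decide (d < c))) (fun d => d)).getD ' ' =
      S[(S.takeWhile (fun d => decide (d < c))).length - 1]'(by
        have := (List.takeWhile_prefix (l := S) (fun d => decide (d < c))).length_le; omega) := by
  have htle : (S.takeWhile (fun d => decide (d < c))).length ≤ S.length :=
    (List.takeWhile_prefix _).length_le
  have hfilter : S.reverse.filter (fun d => decide (d < c)) =
      (S.takeWhile (fun d => decide (d < c))).reverse := by
    rw [List.filter_reverse, sorted_filter_eq_takeWhile S c hs]
  have hFne : (S.takeWhile (fun d => decide (d < c))).reverse ≠ [] := by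
    simp only [ne_eq, List.reverse_eq_nil_iff]
    intro h
    rw [h] at ht
    simp at ht
  rw [hfilter]
  cases hmax : PySem.List.max? (S.takeWhile (fun d => decide (d < c))).reverse (fun d => d) with
  | none => exact absurd ((PySem.List.max?_eq_none_iff _ _).mp hmax) hFne
  | some m =>
    simp only [Option.getD_some]
    have hmem : m ∈ S.takeWhile (fun d => decide (d < c)) := by
      have := PySem.List.max?_mem hmax
      simpa using this
    have hmax' : ∀ y ∈ S.takeWhile (fun d => decide (d < c)), y ≤ m := by
      intro y hy
      exact PySem.List.max?_isMax hmax y (by simpa using hy)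
    have hFt : (S.takeWhile (fun d => decide (d < c)))[(S.takeWhile (fun d => decide (d < c))).length - 1]'(by omega) =
        S[(S.takeWhile (fun d => decide (d < c))).length - 1]'(by omega) :=
      (List.takeWhile_prefix _).getElem (by omega)
    have hFsorted : (S.takeWhile (fun d => decide (d < c))).Pairwise (· ≤ ·) :=
      hs.sublist (List.takeWhile_sublist _)
    have h1 : m ≤ (S.takeWhile (fun d => decide (d < c)))[(S.takeWhile (fun d => decide (d < c))).length - 1]'(by omega) := by
      obtain ⟨u, hu, rfl⟩ := List.mem_iff_getElem.mp hmem
      rcases Nat.lt_or_ge u ((S.takeWhile (fun d => decide (d < c))).length - 1) with h | h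
      · exact List.pairwise_iff_getElem.mp hFsorted u _ (by omega) (by omega) h
      · have : u = (S.takeWhile (fun d => decide (d < c))).length - 1 := by omega
        subst this; exact le_refl _
    have h2 : (S.takeWhile (fun d => decide (d < c)))[(S.takeWhile (fun d => decide (d < c))).length - 1]'(by omega) ≤ m :=
      hmax' _ (List.getElem_mem (by omega))
    rw [← hFt]
    exact le_antisymm h1 h2

-- replacing the last element below c by c keeps the list non-decreasing
theorem set_sorted (S : List Char) (c : Char) (hs : S.Pairwise (· ≤ ·))
    (ht : 0 < (S.takeWhile (fun d => decide (d < c))).length) :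
    (S.set ((S.takeWhile (fun d => decide (d < c))).length - 1) c).Pairwise (· ≤ ·) := by
  have htle : (S.takeWhile (fun d => decide (d < c))).length ≤ S.length :=
    (List.takeWhile_prefix _).length_le
  rw [List.pairwise_iff_getElem]
  intro a b ha hb hab
  simp only [List.length_set] at ha hb
  rw [List.getElem_set, List.getElem_set]
  have hget := List.pairwise_iff_getElem.mp hs
  have hafter : ∀ v, (S.takeWhile (fun d => decide (d < c))).length ≤ v → (hv : v < S.length) →
      c ≤ S[v] := by
    intro v hv1 hv2
    by_contra hvc
    push_neg at hvc
    have hnot := takeWhile_stop_not_lt S c (by omega)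
    rcases Nat.lt_or_ge (S.takeWhile (fun d => decide (d < c))).length v with h | h
    · exact hnot (lt_of_le_of_lt (hget _ v (by omega) (by omega) h) hvc)
    · have : (S.takeWhile (fun d => decide (d < c))).length = v := by omega
      subst this
      exact hnot hvc
  split
  · split
    · omega
    · exact hafter b (by omega) hb
  · split
    · exact le_of_lt (lt_of_le_of_lt (hget a _ (by omega) (by omega) (by omega))
        (takeWhile_getElem_lt S c _ (by omega) (by omega)))
    · exact hget a b (by omega) (by omega) hab

-- multiset bookkeeping: swap-in-place vs remove-then-append
theorem set_perm_erase (S : List Char) (c m : Char) (t : Nat) (h1 : 0 < t) (h2 : t ≤ S.length)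
    (hm : S[t - 1]'(by omega) = m) :
    (S.set (t - 1) c).Perm (S.erase m ++ [c]) := by
  have hcons : S[t - 1]'(by omega) :: S.drop t = S.drop (t - 1) := by
    have h1 := List.getElem_cons_drop (as := S) (i := t - 1) (by omega)
    have e : t - 1 + 1 = t := by omega
    rwa [e] at h1
  have hsplit : S = S.take (t - 1) ++ S[t - 1]'(by omega) :: S.drop t := by
    conv_lhs => rw [← List.take_append_drop (t - 1) S]
    rw [hcons]
  have hset : S.set (t - 1) c = S.take (t - 1) ++ c :: S.drop t := by
    conv_lhs => rw [hsplit]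
    rw [List.set_append, if_neg (by simp [List.length_take] <;> omega)]
    have e : t - 1 - (S.take (t - 1)).length = 0 := by simp [List.length_take] <;> omega
    rw [e, List.set_cons_zero]
  rw [hset]
  refine (List.perm_middle).trans ?_
  refine List.Perm.trans ?_ (List.perm_append_singleton c (S.erase m)).symm
  apply List.Perm.cons
  rw [List.perm_iff_count]
  intro a
  have hmem : m ∈ S := by rw [← hm]; exact List.getElem_mem (by omega)
  have hcount : S.count a = (S.take (t - 1)).count a +
      ((if a = m then 1 else 0) + (S.drop t).count a) := by
    conv_lhs => rw [hsplit]
    simp only [List.count_append, List.count_cons, hm]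
    by_cases ham : m = a
    · subst ham; simp <;> omega
    · rw [if_neg (by simpa using ham), if_neg (fun h => ham h.symm)]
      omega
  rw [List.count_append, List.count_erase]
  by_cases ham : a = m
  · subst ham
    simp only [beq_self_eq_true, if_true]
    have hpos : 1 ≤ S.count a := List.count_pos_iff.mpr hmem
    rw [hcount, if_pos rfl]
    omega
  · have hba : (m == a) = false := by
      simp only [beq_eq_false_iff_ne, ne_eq]
      exact fun h => ham h.symm
    rw [hba]
    simp only [Bool.false_eq_true, if_false, Nat.sub_zero]
    rw [hcount, if_neg ham]
    omega

theorem Abody_sorted (cs : List Char) (hs : cs.Pairwise (· ≤ ·)) : Abody cs = "NO" := by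
  have hle : previousLoopI cs ((cs.length : Int) - 1) ≤ 0 := by
    cases cs with
    | nil =>
      rw [previousLoopI, dif_neg (by rintro ⟨h, -⟩; norm_num at h)]
      simp
    | cons a l =>
      rw [loopI_skip (a :: l) 0 (by simpa using hs) _ (by simp) (by simp <;> omega),
        show ((0 : Nat) : Int) = (0 : Int) by norm_num, loopI_zero]
  simp only [Abody]
  rw [if_pos hle]

theorem core (rs : List Char) : ∀ (rev : List Char), rev.Pairwise (fun a b => b ≤ a) →
    Abody (rs.reverse ++ rev.reverse) =
      (match previousAltLoop rs rev with
       | some l => String.ofList l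
       | none => "NO") := by
  induction rs with
  | nil =>
    intro rev hrev
    simp only [previousAltLoop, List.reverse_nil, List.nil_append]
    exact Abody_sorted _ (List.pairwise_reverse.mpr hrev)
  | cons c rs' ih =>
    intro rev hrev
    by_cases hcond : rev ≠ [] ∧ PySem.List.pyGetD rev (-1) ' ' < c
    · -- pivot found at this position
      obtain ⟨hne, hlt⟩ := hcond
      simp only [previousAltLoop]
      rw [if_pos ⟨hne, hlt⟩]
      have hS : rev.reverse.Pairwise (· ≤ ·) := List.pairwise_reverse.mpr hrev
      have hcs : (c :: rs').reverse ++ rev.reverse = rs'.reverse ++ c :: rev.reverse := by simp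
      rw [hcs]
      have hSne : rev.reverse ≠ [] := by simpa using hne
      have hheadlt : (rev.reverse).head hSne < c := by
        rw [← List.getLast_eq_head_reverse]
        rwa [PySem.List.pyGetD_neg_one rev ' ' hne] at hlt
      set pre := rs'.reverse with hpredef
      set S := rev.reverse with hSdef
      set t := (S.takeWhile (fun d => decide (d < c))).length with htdef
      have htle : t ≤ S.length := (List.takeWhile_prefix _).length_le
      have htpos : 0 < t := by
        by_contra h0
        have ht0 : S.takeWhile (fun d => decide (d < c)) = [] :=
          List.length_eq_zero_iff.mp (by omega)
        have hl : 0 < S.length := List.length_pos_iff.mpr hSne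
        have h2 := List.takeWhile_eq_nil_iff.mp ht0 hl
        apply h2
        simp only [List.get_eq_getElem, List.getElem_zero]
        exact decide_eq_true hheadlt
      have htlt : t - 1 < S.length := by omega
      have hlen : (pre ++ c :: S).length = pre.length + 1 + S.length := by simp; omega
      have hI : previousLoopI (pre ++ c :: S) (((pre ++ c :: S).length : Int) - 1) =
          (pre.length : Int) + 1 := loopI_pivot pre S c hSne hheadlt hS
      have hJ : previousLoopJ (pre ++ c :: S) ((pre.length : Int) + 1) ((pre.length : Int) + 1 - 1) =
          (pre.length : Int) + (t : Int) := by
        have h0 := loopJ_run pre S c hS 0 (by omega)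
        rw [show (pre.length : Int) + 1 - 1 = (pre.length : Int) + ((0 : Nat) : Int)
          by push_cast; ring, h0]
      have hgetc : pvGet (pre ++ c :: S) ((pre.length : Int) + 1 - 1) = c := by
        rw [show (pre.length : Int) + 1 - 1 = ((pre.length + 0 : Nat) : Int) by push_cast; ring,
          pvGet_add]
        simp
      have hm : pvGet (pre ++ c :: S) ((pre.length : Int) + (t : Int)) = S[t - 1]'htlt := by
        rw [show (pre.length : Int) + (t : Int) = ((pre.length + t : Nat) : Int) by push_cast; ring,
          pvGet_add]
        have e : (c :: S)[t]? = S[t - 1]? := by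
          have et : t = (t - 1) + 1 := by omega
          rw [et, List.getElem?_cons_succ]
          congr 1
        rw [e, List.getElem?_eq_getElem htlt, Option.getD_some]
      have hset : PySem.List.pySetD
            (PySem.List.pySetD (pre ++ c :: S) ((pre.length : Int) + (t : Int)) c)
            ((pre.length : Int) + 1 - 1) (S[t - 1]'htlt) =
          pre ++ S[t - 1]'htlt :: S.set (t - 1) c := by
        rw [PySem.List.pySetD_of_nonneg, PySem.List.pySetD_of_nonneg]
        have e1 : ((pre.length : Int) + (t : Int)).toNat = pre.length + t := by omega
        have e2 : ((pre.length : Int) + 1 - 1).toNat = pre.length := by omega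
        rw [e1, e2]
        rw [List.set_append, if_neg (by omega)]
        have e3 : pre.length + t - pre.length = (t - 1) + 1 := by omega
        rw [e3, List.set_cons_succ]
        rw [List.set_append, if_neg (by omega)]
        rw [Nat.sub_self, List.set_cons_zero]
        all_goals omega
      have hslice1 : PySem.List.slice (pre ++ S[t - 1]'htlt :: S.set (t - 1) c) none
            (some ((pre.length : Int) + 1)) = pre ++ [S[t - 1]'htlt] := by
        rw [PySem.List.slice_to]
        have e : ((pre.length : Int) + 1).toNat = pre.length + 1 := by omega
        rw [e, List.take_append]
        · simp
        · omega
      have hslice2 : PySem.List.slice (pre ++ S[t - 1]'htlt :: S.set (t - 1) c)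
            (some ((pre.length : Int) + 1)) none = S.set (t - 1) c := by
        rw [PySem.List.slice_from]
        have e : ((pre.length : Int) + 1).toNat = pre.length + 1 := by omega
        rw [e, show pre ++ S[t - 1]'htlt :: S.set (t - 1) c =
          (pre ++ [S[t - 1]'htlt]) ++ S.set (t - 1) c by simp]
        · exact List.drop_left' (by simp)
        · omega
      simp only [Abody]
      rw [hI, if_neg (show ¬ ((pre.length : Int) + 1 ≤ 0) by omega), hJ, hgetc, hm, hset,
        hslice1, hslice2]
      have hmemrev : S[t - 1]'htlt ∈ rev := by
        have h1 : S[t - 1]'htlt ∈ S := List.getElem_mem htlt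
        exact List.mem_reverse.mp h1
      have hmax : (PySem.List.max? (rev.filter (fun d => decide (d < c))) (fun d => d)).getD ' ' =
          S[t - 1]'htlt := by
        have h1 := max_smaller_eq S c hS (by omega)
        have hrr : S.reverse = rev := by simp [hSdef]
        rw [hrr] at h1
        exact h1
      have hremove : (PySem.List.remove? rev (S[t - 1]'htlt)).getD rev =
          rev.erase (S[t - 1]'htlt) := by
        rw [PySem.List.remove?_eq_some_erase rev _ hmemrev]
        rfl
      rw [hmax, hremove]
      have htail : PySem.List.sorted (rev.erase (S[t - 1]'htlt) ++ [c]) (fun d => d) true =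
          (S.set (t - 1) c).reverse := by
        apply List.Perm.eq_of_pairwise (le := fun a b : Char => b ≤ a)
        · exact fun a b _ _ hab hba => le_antisymm hba hab
        · exact PySem.List.sorted_pairwise_rev _ _
        · rw [List.pairwise_reverse]
          exact set_sorted S c hS (by omega)
        · refine (PySem.List.sorted_perm _ _ _).trans ?_
          refine List.Perm.trans ?_ (List.reverse_perm _).symm
          refine List.Perm.trans (List.Perm.append_right [c] ?_)
            (set_perm_erase S c _ t htpos htle rfl).symm
          exact ((List.reverse_perm rev).symm).erase _
      rw [htail]
      simp [hpredef]
    · -- no pivot here: step the accumulator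
      simp only [previousAltLoop]
      rw [if_neg hcond]
      have hrev' : (rev ++ [c]).Pairwise (fun a b => b ≤ a) := by
        rw [List.pairwise_append]
        refine ⟨hrev, by simp, ?_⟩
        intro a ha b hb
        simp only [List.mem_singleton] at hb
        subst hb
        rcases eq_or_ne rev [] with h | h
        · subst h; simp at ha
        · push_neg at hcond
          have hc := hcond h
          rw [PySem.List.pyGetD_neg_one rev ' ' h] at hc
          exact le_trans hc (last_min_of_pairwise_ge rev hrev h a ha)
      have h2 := ih (rev ++ [c]) hrev'
      rw [← h2]
      congr 1
      simp

-- ===== VERDICT (by name: the statement is the Claim_ definition above) =====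
theorem previous_spec : Claim_equal_previous := by
  intro s _
  unfold Spec_previous
  have h := core s.toList.reverse [] (by simp)
  simp only [List.reverse_reverse, List.reverse_nil, List.append_nil] at h
  rw [previous_eq_Abody, h, previous_alt]
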